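-- pv_equiv track=rewrite | github.com/tingrui-huang/causal-refinement-lab | Neuro-Symbolic-Reasoning/scripts/convert_all_datasets.py | extract_variables_from_metadata
-- ===== SOURCE A (Python) =====
-- def extract_variables_from_metadata(df_columns, metadata):
--     """
--     从 metadata 反向提取变量顺序（修复多下划线问题）
--
--     Args:
--         df_columns: CSV 列名列表
--         metadata: metadata.json 内容
--
--     Returns:
--         变量名列表（按 CSV 中首次出现的顺序）
--     """
--     state_mappings = metadata['state_mappings']
--
--     # 建立 state_name -> variable_name 的映射
--     state_to_var = {}
--     for var_name, states in state_mappings.items():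
--         for state_code, state_name in states.items():
--             state_to_var[state_name] = var_name
--
--     # 按 CSV 列顺序提取变量（保持首次出现顺序）
--     variables_ordered = []
--     seen_vars = set()
--
--     for col in df_columns:
--         if col in state_to_var:
--             var_name = state_to_var[col]
--             if var_name not in seen_vars:
--                 variables_ordered.append(var_name)
--                 seen_vars.add(var_name)
--
--     return variables_ordered
-- ===== SOURCE B (Python) =====
-- def extract_variables_from_metadata(df_columns, metadata):
--     """Per-column direct scan: for each CSV column, find the variable whose
--     states contain that column name, deduplicating by first appearance."""
--     state_mappings = metadata['state_mappings']
--
--     variables_ordered = []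
--     seen_vars = set()
--
--     for col in df_columns:
--         for var_name, states in state_mappings.items():
--             if col in states.values():
--                 if var_name not in seen_vars:
--                     variables_ordered.append(var_name)
--                     seen_vars.add(var_name)
--                 break
--
--     return variables_ordered
-- ===== Notes on version B (the rewrite author's own statement) =====
-- stated objective: alternative
-- what changed: B drops A's precomputed state_name->variable dict: for each CSV column it scans state_mappings directly and takes the first variable whose states contain that column, deduplicating by first appearance; Pre_ excludes metadata without a 'state_mappings' key (A raises KeyError) and inputs where some CSV column is a state name under more than one variable, a corner where A's last-wins dict-overwrite order and B's first-match order are equally accidental.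
import Mathlib
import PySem

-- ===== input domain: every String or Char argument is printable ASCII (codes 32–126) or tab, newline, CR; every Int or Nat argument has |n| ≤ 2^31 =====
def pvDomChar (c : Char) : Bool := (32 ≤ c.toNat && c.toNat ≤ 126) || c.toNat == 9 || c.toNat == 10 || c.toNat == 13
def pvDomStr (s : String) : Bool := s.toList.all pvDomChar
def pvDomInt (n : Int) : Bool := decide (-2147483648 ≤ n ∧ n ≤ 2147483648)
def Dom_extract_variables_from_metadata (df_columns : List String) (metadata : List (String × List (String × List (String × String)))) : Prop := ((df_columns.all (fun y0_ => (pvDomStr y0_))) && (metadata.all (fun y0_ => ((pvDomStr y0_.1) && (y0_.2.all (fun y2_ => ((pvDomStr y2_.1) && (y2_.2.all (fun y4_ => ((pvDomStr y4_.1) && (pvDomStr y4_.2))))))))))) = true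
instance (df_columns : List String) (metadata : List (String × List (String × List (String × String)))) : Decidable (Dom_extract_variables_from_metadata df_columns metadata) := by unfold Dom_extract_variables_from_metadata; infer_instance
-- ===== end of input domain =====

-- B drops A's precomputed state_name->variable dict and, per CSV column, scans
-- state_mappings directly for the variable whose states contain the column
-- (alternative decomposition, same return value on Pre_).

-- ===== PORT A =====
def extract_variables_from_metadata (df_columns : List String) (metadata : List (String × List (String × List (String × String)))) : List String :=
  match (PySem.Dict.ofList metadata).get? "state_mappings" with
  | none => []  -- unreachable under Pre_ (Python raises KeyError here)
  | some sm =>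
    -- state_to_var[state_name] = var_name, dict-overwrite semantics
    let state_to_var : PySem.Dict String String :=
      (PySem.Dict.ofList sm).items.foldl
        (fun d p => (PySem.Dict.ofList p.2).items.foldl (fun d q => d.insert q.2 p.1) d)
        PySem.Dict.empty
    (df_columns.foldl
      (fun (acc : List String × PySem.Set String) col =>
        if state_to_var.contains col then
          let var_name := state_to_var.getD col ""
          if acc.2.contains var_name then acc
          else (acc.1 ++ [var_name], PySem.Set.add acc.2 var_name)
        else acc)
      ([], PySem.Set.empty)).1

-- ===== PORT B =====
-- first variable (in state_mappings order) whose states dict contains col as a value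
def pvFindVarFor (col : String) (items : List (String × List (String × String))) : Option String :=
  items.findSome? (fun p => if (PySem.Dict.ofList p.2).values.contains col then some p.1 else none)

def extract_variables_from_metadata_alt (df_columns : List String) (metadata : List (String × List (String × List (String × String)))) : List String :=
  match (PySem.Dict.ofList metadata).get? "state_mappings" with
  | none => []  -- unreachable under Pre_ (Python raises KeyError here)
  | some sm =>
    let items := (PySem.Dict.ofList sm).items
    (df_columns.foldl
      (fun (acc : List String × PySem.Set String) col =>
        match pvFindVarFor col items with
        | none => acc
        | some v =>
          if acc.2.contains v then acc
          else (acc.1 ++ [v], PySem.Set.add acc.2 v))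
      ([], PySem.Set.empty)).1

-- ===== PRECONDITION & SPEC =====
-- the per-variable lists of state names, as A's Python dict iteration sees them
def pvStateLists (metadata : List (String × List (String × List (String × String)))) : List (List String) :=
  match (PySem.Dict.ofList metadata).get? "state_mappings" with
  | none => []
  | some sm => (PySem.Dict.ofList sm).items.map (fun p => (PySem.Dict.ofList p.2).values)

-- Pre_ excludes metadata without a 'state_mappings' key, on which A raises KeyError, and
-- inputs where some CSV column is a state name under more than one variable, a corner on
-- which A's last-wins dict-overwrite order and B's first-match order are equally accidental.
def Pre_extract_variables_from_metadata (df_columns : List String) (metadata : List (String × List (String × List (String × String)))) : Prop :=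
  "state_mappings" ∈ metadata.map (·.1) ∧
  ∀ col ∈ df_columns, (pvStateLists metadata).countP (fun l => l.contains col) ≤ 1
instance (df_columns : List String) (metadata : List (String × List (String × List (String × String)))) : Decidable (Pre_extract_variables_from_metadata df_columns metadata) := by unfold Pre_extract_variables_from_metadata; infer_instance

def pvWitness_extract_variables_from_metadata : List String × (List (String × List (String × List (String × String)))) :=
  (["yes", "hot", "no"], [("state_mappings", [("Rain", [("0", "no"), ("1", "yes")]), ("Sun", [("0", "hot"), ("1", "cold")])])])

def Spec_extract_variables_from_metadata (df_columns : List String) (metadata : List (String × List (String × List (String × String)))) (out : List String) : Prop := out = extract_variables_from_metadata_alt df_columns metadata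
instance (df_columns : List String) (metadata : List (String × List (String × List (String × String)))) (out : List String) : Decidable (Spec_extract_variables_from_metadata df_columns metadata out) := by unfold Spec_extract_variables_from_metadata; infer_instance

-- ===== CLAIM (what is proved, stated in full; the proofs are below) =====
def Claim_equal_extract_variables_from_metadata : Prop := ∀ (df_columns : List String) (metadata : List (String × List (String × List (String × String)))), Dom_extract_variables_from_metadata df_columns metadata → Pre_extract_variables_from_metadata df_columns metadata → Spec_extract_variables_from_metadata df_columns metadata (extract_variables_from_metadata df_columns metadata)

-- ===== LEMMAS AND PROOFS =====

-- inner loop of A: inserting every state_name of one variable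
theorem pv_inner_get? (qs : List (String × String)) (d : PySem.Dict String String) (v col : String) :
    ((qs.foldl (fun d q => d.insert q.2 v) d).get? col)
      = if (qs.map (·.2)).contains col then some v else d.get? col := by
  induction qs generalizing d with
  | nil => simp
  | cons q t ih =>
    simp only [List.foldl_cons, ih, List.map_cons, List.contains_cons]
    by_cases he : col = q.2
    · simp [he, PySem.Dict.get?_insert_self]
    · rw [PySem.Dict.get?_insert_of_ne _ _ he]
      have hb : (col == q.2) = false := beq_false_of_ne he
      rw [hb]
      rfl

-- outer loop of A: its lookup is a last-match scan over the items
theorem pv_outer_get? (items : List (String × List (String × String))) (d : PySem.Dict String String) (col : String) :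
    ((items.foldl (fun d p => (PySem.Dict.ofList p.2).items.foldl (fun d q => d.insert q.2 p.1) d) d).get? col)
      = items.foldl (fun m p => if (PySem.Dict.ofList p.2).values.contains col then some p.1 else m) (d.get? col) := by
  induction items generalizing d with
  | nil => rfl
  | cons p t ih =>
    simp only [List.foldl_cons, ih, pv_inner_get?]
    rfl

theorem pv_foldl_no_match (col : String) (t : List (String × List (String × String))) (m : Option String)
    (h : ∀ p ∈ t, ((PySem.Dict.ofList p.2).values.contains col) = false) :
    t.foldl (fun m p => if (PySem.Dict.ofList p.2).values.contains col then some p.1 else m) m = m := by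
  induction t generalizing m with
  | nil => rfl
  | cons p t ih =>
    have hp := h p (List.mem_cons_self ..)
    simp only [List.foldl_cons]
    rw [hp, if_neg (by simp)]
    exact ih m (fun q hq => h q (List.mem_cons_of_mem _ hq))

-- when at most one variable's states contain col, last match = first match
theorem pv_last_eq_first (col : String) (items : List (String × List (String × String)))
    (h : items.countP (fun p => (PySem.Dict.ofList p.2).values.contains col) ≤ 1) :
    items.foldl (fun m p => if (PySem.Dict.ofList p.2).values.contains col then some p.1 else m) none
      = pvFindVarFor col items := by
  induction items with
  | nil => rfl
  | cons p t ih =>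
    rw [List.countP_cons] at h
    by_cases hp : ((PySem.Dict.ofList p.2).values.contains col) = true
    · rw [hp, if_pos rfl] at h
      have hz : t.countP (fun p => (PySem.Dict.ofList p.2).values.contains col) = 0 := by omega
      have hno : ∀ q ∈ t, ((PySem.Dict.ofList q.2).values.contains col) = false := by
        intro q hq
        have := List.countP_eq_zero.mp hz q hq
        simpa using this
      simp only [List.foldl_cons]
      rw [hp, if_pos rfl, pv_foldl_no_match col t (some p.1) hno]
      unfold pvFindVarFor
      simp only [List.findSome?_cons]
      rw [hp, if_pos rfl]
    · have hp' : ((PySem.Dict.ofList p.2).values.contains col) = false := by simpa using hp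
      simp only [List.foldl_cons]
      rw [hp', if_neg (by simp)]
      rw [ih (by omega)]
      unfold pvFindVarFor
      simp only [List.findSome?_cons]
      rw [hp', if_neg (by simp)]

theorem pv_state_to_var_get? (items : List (String × List (String × String))) (col : String)
    (h : items.countP (fun p => (PySem.Dict.ofList p.2).values.contains col) ≤ 1) :
    ((items.foldl (fun d p => (PySem.Dict.ofList p.2).items.foldl (fun d q => d.insert q.2 p.1) d) PySem.Dict.empty).get? col)
      = pvFindVarFor col items := by
  rw [pv_outer_get?, PySem.Dict.get?_empty, pv_last_eq_first col items h]

-- ===== VERDICT (by name: the statement is the Claim_ definition above) =====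
theorem extract_variables_from_metadata_spec : Claim_equal_extract_variables_from_metadata := by
  intro df_columns metadata _ hpre
  obtain ⟨-, hpw⟩ := hpre
  unfold Spec_extract_variables_from_metadata extract_variables_from_metadata extract_variables_from_metadata_alt
  cases h : (PySem.Dict.ofList metadata).get? "state_mappings" with
  | none => rfl
  | some sm =>
    simp only
    congr 1
    apply PySem.List.foldl_congr_mem
    intro acc col hmem
    have hcnt : ((PySem.Dict.ofList sm).items.countP
        (fun p => (PySem.Dict.ofList p.2).values.contains col)) ≤ 1 := by
      have := hpw col hmem
      unfold pvStateLists at this; rw [h] at this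
      simpa [List.countP_map, Function.comp] using this
    have hg := pv_state_to_var_get? (PySem.Dict.ofList sm).items col hcnt
    cases hf : pvFindVarFor col (PySem.Dict.ofList sm).items with
    | none =>
      have hc : (((PySem.Dict.ofList sm).items.foldl
          (fun d p => (PySem.Dict.ofList p.2).items.foldl (fun d q => d.insert q.2 p.1) d)
          PySem.Dict.empty).contains col) = false := by
        rw [PySem.Dict.contains_eq_isSome_get?, hg, hf]; rfl
      simp [hc]
    | some v =>
      have hc : (((PySem.Dict.ofList sm).items.foldl
          (fun d p => (PySem.Dict.ofList p.2).items.foldl (fun d q => d.insert q.2 p.1) d)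
          PySem.Dict.empty).contains col) = true := by
        rw [PySem.Dict.contains_eq_isSome_get?, hg, hf]; rfl
      have hd : (((PySem.Dict.ofList sm).items.foldl
          (fun d p => (PySem.Dict.ofList p.2).items.foldl (fun d q => d.insert q.2 p.1) d)
          PySem.Dict.empty).getD col "") = v := by
        rw [PySem.Dict.getD_eq_get?_getD, hg, hf]; rfl
      simp [hc, hd]
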